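-- pv_equiv track=rewrite | github.com/alex-ong/UNSWRevueStatics | Model/CueList.py | alterPivot
-- ===== SOURCE A (Python) =====
-- def alterPivot(listLen, numIndices, index, fromEnd):
--     endIndex = index + fromEnd
--     startIndex = index - numIndices + fromEnd
--     while endIndex > listLen:
--         endIndex -= 1
--         startIndex -= 1
--     while startIndex < 0:
--         startIndex += 1
--         endIndex += 1
--     return (startIndex, endIndex)
-- ===== SOURCE B (Python) =====
-- def alterPivot(listLen, numIndices, index, fromEnd):
--     # O(1): arithmetic clamping instead of unit-step loops
--     endIndex = index + fromEnd
--     startIndex = index - numIndices + fromEnd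
--     down = max(endIndex - listLen, 0)
--     startIndex -= down
--     endIndex -= down
--     up = max(-startIndex, 0)
--     return (startIndex + up, endIndex + up)
-- ===== Notes on version B (the rewrite author's own statement) =====
-- stated objective: faster
-- what changed: Replaces the two unit-step shifting while-loops with direct arithmetic clamping (max-based shift amounts), computing the window in O(1).
import Mathlib
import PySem

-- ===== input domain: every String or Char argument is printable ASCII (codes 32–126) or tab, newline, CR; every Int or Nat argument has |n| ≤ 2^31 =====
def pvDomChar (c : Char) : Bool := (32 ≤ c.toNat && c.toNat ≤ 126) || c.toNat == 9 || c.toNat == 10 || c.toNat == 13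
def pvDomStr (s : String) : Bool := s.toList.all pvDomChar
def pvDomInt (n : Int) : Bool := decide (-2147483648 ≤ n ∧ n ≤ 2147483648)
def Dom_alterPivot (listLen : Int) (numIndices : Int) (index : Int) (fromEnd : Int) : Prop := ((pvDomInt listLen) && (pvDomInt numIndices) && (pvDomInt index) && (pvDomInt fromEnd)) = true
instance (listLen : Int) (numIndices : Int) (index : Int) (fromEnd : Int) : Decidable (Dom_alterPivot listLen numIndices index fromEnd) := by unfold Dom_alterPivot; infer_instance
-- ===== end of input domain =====

-- B replaces A's two unit-step while-loops by O(1) arithmetic clamping; return value only (Python returns a tuple, rendered here as a 2-element list).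
-- ===== PORT A =====
-- while endIndex > listLen: endIndex -= 1; startIndex -= 1
def pvLoopDown (listLen endIndex startIndex : Int) : Int × Int :=
  if endIndex > listLen then pvLoopDown listLen (endIndex - 1) (startIndex - 1)
  else (endIndex, startIndex)
termination_by (endIndex - listLen).toNat
decreasing_by omega

-- while startIndex < 0: startIndex += 1; endIndex += 1
def pvLoopUp (startIndex endIndex : Int) : Int × Int :=
  if startIndex < 0 then pvLoopUp (startIndex + 1) (endIndex + 1)
  else (startIndex, endIndex)
termination_by (-startIndex).toNat
decreasing_by omega

def alterPivot (listLen : Int) (numIndices : Int) (index : Int) (fromEnd : Int) : List Int :=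
  let endIndex := index + fromEnd
  let startIndex := index - numIndices + fromEnd
  let p := pvLoopDown listLen endIndex startIndex
  let q := pvLoopUp p.2 p.1
  [q.1, q.2]

-- ===== PORT B =====
def alterPivot_alt (listLen : Int) (numIndices : Int) (index : Int) (fromEnd : Int) : List Int :=
  let endIndex := index + fromEnd
  let startIndex := index - numIndices + fromEnd
  let down := max (endIndex - listLen) 0
  let startIndex := startIndex - down
  let endIndex := endIndex - down
  let up := max (-startIndex) 0
  [startIndex + up, endIndex + up]

-- ===== PRECONDITION & SPEC =====
def Spec_alterPivot (listLen : Int) (numIndices : Int) (index : Int) (fromEnd : Int) (out : List Int) : Prop := out = alterPivot_alt listLen numIndices index fromEnd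
instance (listLen : Int) (numIndices : Int) (index : Int) (fromEnd : Int) (out : List Int) : Decidable (Spec_alterPivot listLen numIndices index fromEnd out) := by unfold Spec_alterPivot; infer_instance

-- ===== CLAIM (what is proved, stated in full; the proofs are below) =====
def Claim_equal_alterPivot : Prop := ∀ (listLen : Int) (numIndices : Int) (index : Int) (fromEnd : Int), Dom_alterPivot listLen numIndices index fromEnd → Spec_alterPivot listLen numIndices index fromEnd (alterPivot listLen numIndices index fromEnd)

-- ===== LEMMAS AND PROOFS =====

-- ===== VERDICT (by name: the statement is the Claim_ definition above) =====
theorem pvLoopDown_eq (listLen e s : Int) :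
    pvLoopDown listLen e s = (e - max (e - listLen) 0, s - max (e - listLen) 0) := by
  by_cases h : e > listLen
  · rw [pvLoopDown, if_pos h, pvLoopDown_eq]
    simp only [Prod.mk.injEq]; omega
  · rw [pvLoopDown, if_neg h]
    simp only [Prod.mk.injEq]; omega
termination_by (e - listLen).toNat
decreasing_by omega

theorem pvLoopUp_eq (s e : Int) :
    pvLoopUp s e = (s + max (-s) 0, e + max (-s) 0) := by
  by_cases h : s < 0
  · rw [pvLoopUp, if_pos h, pvLoopUp_eq]
    simp only [Prod.mk.injEq]; omega
  · rw [pvLoopUp, if_neg h]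
    simp only [Prod.mk.injEq]; omega
termination_by (-s).toNat
decreasing_by omega

theorem alterPivot_spec : Claim_equal_alterPivot := by
  intro listLen numIndices index fromEnd _
  unfold Spec_alterPivot alterPivot alterPivot_alt
  simp only [pvLoopDown_eq, pvLoopUp_eq]
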